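-- pv_equiv track=rewrite | github.com/alexandraback/datacollection | solutions_5744014401732608_0/Python/peta/b.py | move_b
-- ===== SOURCE A (Python) =====
-- def move_b(oldm):
--     m = [[0 for x in range(len(oldm))] for y in range(len(oldm))]
--     for i in range(len(m)-1):
--         for j in range(len(m)-1):
--             m[i][j] = oldm[i+1][j+1]
--         m[i][-1] = oldm[i+1][0]
--         m[-1][i] = oldm[0][i+1]
--     m[-1][-1] = oldm[0][0]
--     return m
-- ===== SOURCE B (Python) =====
-- def move_b(oldm):
--     n = len(oldm)
--     rows = oldm[1:] + oldm[:1]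
--     return [row[1:n] + row[:1] for row in rows]
-- ===== Notes on version B (the rewrite author's own statement) =====
-- stated objective: simpler
-- what changed: Replaces A's zero matrix filled by a double loop of per-cell assignments plus separate last-column/last-row/corner cases with whole-list rotation by slicing: rotate the row list (oldm[1:] + oldm[:1]) and rotate/trim each row (row[1:n] + row[:1]); bulk slicing avoids per-element index arithmetic.
import Mathlib
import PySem

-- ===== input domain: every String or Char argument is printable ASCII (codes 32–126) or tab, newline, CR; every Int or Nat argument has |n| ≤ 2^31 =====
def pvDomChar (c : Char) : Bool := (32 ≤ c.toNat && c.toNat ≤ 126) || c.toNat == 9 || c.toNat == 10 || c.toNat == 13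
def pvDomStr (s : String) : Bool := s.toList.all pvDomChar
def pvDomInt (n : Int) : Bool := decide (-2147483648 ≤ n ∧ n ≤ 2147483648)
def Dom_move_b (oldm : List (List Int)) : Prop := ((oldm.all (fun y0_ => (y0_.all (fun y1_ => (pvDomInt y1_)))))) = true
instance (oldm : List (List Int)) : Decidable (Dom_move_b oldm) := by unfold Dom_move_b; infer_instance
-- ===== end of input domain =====

-- B builds the result by whole-list rotation with slicing (rotate the list of rows,
-- then rotate/trim each row), instead of A's zero matrix filled by per-cell
-- assignments with separate last-column/last-row/corner cases (simpler decomposition).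

-- ===== PORT A =====
def move_b (oldm : List (List Int)) : List (List Int) :=
  let n := oldm.length
  -- m = [[0 for x in range(len(oldm))] for y in range(len(oldm))]
  let m0 := (List.range n).map (fun _ => (List.range n).map (fun _ => (0 : Int)))
  -- for i in range(len(m)-1): … (len(m) = n)
  let m1 := (PySem.List.pyRange 0 ((n : Int) - 1) 1).foldl (fun m i =>
    -- for j in range(len(m)-1): m[i][j] = oldm[i+1][j+1]
    let m := (PySem.List.pyRange 0 ((n : Int) - 1) 1).foldl (fun m j =>
      PySem.List.pySetD m i
        (PySem.List.pySetD (PySem.List.pyGetD m i [])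
          j (PySem.List.pyGetD (PySem.List.pyGetD oldm (i + 1) []) (j + 1) 0))) m
    -- m[i][-1] = oldm[i+1][0]
    let m := PySem.List.pySetD m i
      (PySem.List.pySetD (PySem.List.pyGetD m i [])
        (-1) (PySem.List.pyGetD (PySem.List.pyGetD oldm (i + 1) []) 0 0))
    -- m[-1][i] = oldm[0][i+1]
    PySem.List.pySetD m (-1)
      (PySem.List.pySetD (PySem.List.pyGetD m (-1) [])
        i (PySem.List.pyGetD (PySem.List.pyGetD oldm 0 []) (i + 1) 0))) m0
  -- m[-1][-1] = oldm[0][0]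
  PySem.List.pySetD m1 (-1)
    (PySem.List.pySetD (PySem.List.pyGetD m1 (-1) [])
      (-1) (PySem.List.pyGetD (PySem.List.pyGetD oldm 0 []) 0 0))

-- ===== PORT B =====
def move_b_alt (oldm : List (List Int)) : List (List Int) :=
  let n := oldm.length
  -- rows = oldm[1:] + oldm[:1]
  let rows := PySem.List.slice oldm (some 1) none ++ PySem.List.slice oldm none (some 1)
  -- [row[1:n] + row[:1] for row in rows]
  rows.map (fun row =>
    PySem.List.slice row (some 1) (some (n : Int)) ++ PySem.List.slice row none (some 1))

-- ===== PRECONDITION & SPEC =====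
-- Pre_ excludes exactly where Python A raises IndexError: the empty matrix
-- (at m[-1][-1] = oldm[0][0]) and matrices with a row shorter than the matrix
-- (reading oldm[i+1][j+1]).
def Pre_move_b (oldm : List (List Int)) : Prop :=
  0 < oldm.length ∧ ∀ row ∈ oldm, oldm.length ≤ row.length
instance (oldm : List (List Int)) : Decidable (Pre_move_b oldm) := by unfold Pre_move_b; infer_instance

def pvWitness_move_b : List (List Int) := [[1, 2, 3], [4, 5, 6], [7, 8, 9]]

def Spec_move_b (oldm : List (List Int)) (out : List (List Int)) : Prop := out = move_b_alt oldm
instance (oldm : List (List Int)) (out : List (List Int)) : Decidable (Spec_move_b oldm out) := by unfold Spec_move_b; infer_instance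

-- ===== CLAIM (what is proved, stated in full; the proofs are below) =====
def Claim_equal_move_b : Prop := ∀ (oldm : List (List Int)), Dom_move_b oldm → Pre_move_b oldm → Spec_move_b oldm (move_b oldm)

-- ===== LEMMAS AND PROOFS =====

-- the common target: cell (i, j) of the result is oldm[(i+1) % n][(j+1) % n]
def bCell (oldm : List (List Int)) (i j : Nat) : Int :=
  (oldm.getD ((i + 1) % oldm.length) []).getD ((j + 1) % oldm.length) 0

-- an n×n matrix given by a cell function
def mOf (n : Nat) (f : Nat → Nat → Int) : List (List Int) :=
  (List.range n).map (fun i => (List.range n).map (f i))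

-- f with the single cell (i, j) overwritten by v
def updF (f : Nat → Nat → Int) (i j : Nat) (v : Int) : Nat → Nat → Int :=
  fun a b => if a = i ∧ b = j then v else f a b

-- the cell function of A's intermediate state: rows < k fully shifted, the last
-- row shifted up to column k, the in-progress row k shifted up to column t
def aCell (oldm : List (List Int)) (k t : Nat) : Nat → Nat → Int :=
  fun i j =>
    if i < k ∨ (i = oldm.length - 1 ∧ j < k) ∨ (i = k ∧ j < t)
    then bCell oldm i j else 0

-- the body of A's outer loop (zeta-expanded form of the lambda inside move_b)
def bodyA (oldm : List (List Int)) (m : List (List Int)) (i : Int) : List (List Int) :=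
  let m := (PySem.List.pyRange 0 ((oldm.length : Int) - 1) 1).foldl (fun m j =>
    PySem.List.pySetD m i
      (PySem.List.pySetD (PySem.List.pyGetD m i [])
        j (PySem.List.pyGetD (PySem.List.pyGetD oldm (i + 1) []) (j + 1) 0))) m
  let m := PySem.List.pySetD m i
    (PySem.List.pySetD (PySem.List.pyGetD m i [])
      (-1) (PySem.List.pyGetD (PySem.List.pyGetD oldm (i + 1) []) 0 0))
  PySem.List.pySetD m (-1)
    (PySem.List.pySetD (PySem.List.pyGetD m (-1) [])
      i (PySem.List.pyGetD (PySem.List.pyGetD oldm 0 []) (i + 1) 0))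

lemma move_b_unfold (oldm : List (List Int)) :
    move_b oldm =
      PySem.List.pySetD
        ((PySem.List.pyRange 0 ((oldm.length : Int) - 1) 1).foldl
          (fun m i => bodyA oldm m i)
          ((List.range oldm.length).map (fun _ => (List.range oldm.length).map (fun _ => (0 : Int)))))
        (-1)
        (PySem.List.pySetD
          (PySem.List.pyGetD
            ((PySem.List.pyRange 0 ((oldm.length : Int) - 1) 1).foldl
              (fun m i => bodyA oldm m i)
              ((List.range oldm.length).map (fun _ => (List.range oldm.length).map (fun _ => (0 : Int)))))
            (-1) [])
          (-1) (PySem.List.pyGetD (PySem.List.pyGetD oldm 0 []) 0 0)) := rfl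

lemma set_map_range {α : Type} (f : Nat → α) (n k : Nat) (v : α) (_hk : k < n) :
    ((List.range n).map f).set k v
      = (List.range n).map (fun i => if i = k then v else f i) := by
  apply List.ext_getElem
  · simp
  · intro i h1 h2
    simp only [List.getElem_set, List.getElem_map, List.getElem_range]
    by_cases h : i = k
    · simp [h]
    · simp [h, Ne.symm h]

lemma pySetD_neg_one {α : Type} (xs : List α) (v : α) (h : 0 < xs.length) :
    PySem.List.pySetD xs (-1) v = xs.set (xs.length - 1) v := by
  have h1 : 1 ≤ xs.length := h
  simp [PySem.List.pySetD, PySem.List.pySet?, PySem.List.pyIdx?, h1]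

lemma mOf_congr (n : Nat) (f g : Nat → Nat → Int)
    (h : ∀ i < n, ∀ j < n, f i j = g i j) : mOf n f = mOf n g := by
  unfold mOf
  apply List.map_congr_left
  intro i hi
  apply List.map_congr_left
  intro j hj
  exact h i (List.mem_range.mp hi) j (List.mem_range.mp hj)

-- row access
lemma row_mOf (n : Nat) (f : Nat → Nat → Int) (i : Nat) (hi : i < n) :
    PySem.List.pyGetD (mOf n f) (i : Int) [] = (List.range n).map (f i) := by
  rw [PySem.List.pyGetD_natCast, mOf, PySem.List.getD_map_range _ _ _ _ hi]

lemma row_mOf_neg_one (n : Nat) (f : Nat → Nat → Int) (hn : 0 < n) :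
    PySem.List.pyGetD (mOf n f) (-1) [] = (List.range n).map (f (n - 1)) := by
  rw [PySem.List.pyGetD_neg_ofNat (mOf n f) 1 [] (by omega) (by simp [mOf]; omega)]
  simp [mOf]

-- row update
lemma rowset_nat (n : Nat) (g : Nat → Int) (j : Nat) (v : Int) :
    PySem.List.pySetD ((List.range n).map g) (j : Int) v
      = ((List.range n).map g).set j v := PySem.List.pySetD_natCast _ _ _

lemma rowset_neg_one (n : Nat) (g : Nat → Int) (v : Int) (hn : 0 < n) :
    PySem.List.pySetD ((List.range n).map g) (-1) v
      = ((List.range n).map g).set (n - 1) v := by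
  rw [pySetD_neg_one _ _ (by simp; omega)]
  simp

-- one whole Python assignment  m[i][j] = v  on an mOf matrix
lemma assign_mOf (n : Nat) (f : Nat → Nat → Int) (i j : Nat) (v : Int)
    (hi : i < n) (hj : j < n) :
    PySem.List.pySetD (mOf n f) (i : Int) (((List.range n).map (f i)).set j v)
      = mOf n (updF f i j v) := by
  rw [PySem.List.pySetD_natCast, set_map_range _ _ _ _ hj, mOf,
      set_map_range _ _ _ _ hi]
  apply List.map_congr_left
  intro a ha
  by_cases hai : a = i
  · subst hai
    rw [if_pos rfl]
    apply List.map_congr_left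
    intro b hb
    simp [updF]
  · rw [if_neg hai]
    apply List.map_congr_left
    intro b hb
    simp [updF, hai]

lemma assign_mOf_last (n : Nat) (f : Nat → Nat → Int) (j : Nat) (v : Int)
    (hn : 0 < n) (hj : j < n) :
    PySem.List.pySetD (mOf n f) (-1) (((List.range n).map (f (n - 1))).set j v)
      = mOf n (updF f (n - 1) j v) := by
  rw [pySetD_neg_one _ _ (by simp [mOf]; omega),
      show (mOf n f).length = n by simp [mOf],
      show (mOf n f).set (n - 1) (((List.range n).map (f (n - 1))).set j v)
        = PySem.List.pySetD (mOf n f) ((n - 1 : Nat) : Int)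
            (((List.range n).map (f (n - 1))).set j v)
        from (PySem.List.pySetD_natCast _ _ _).symm,
      assign_mOf n f (n - 1) j v (by omega) hj]

-- cell values of oldm read by A, expressed through B's rule
lemma bCell_interior (oldm : List (List Int)) (k t : Nat)
    (hk : k + 1 < oldm.length) (ht : t + 1 < oldm.length) :
    bCell oldm k t = (oldm.getD (k + 1) []).getD (t + 1) 0 := by
  simp [bCell, Nat.mod_eq_of_lt hk, Nat.mod_eq_of_lt ht]

lemma bCell_lastcol (oldm : List (List Int)) (k : Nat)
    (hk : k + 1 < oldm.length) :
    bCell oldm k (oldm.length - 1) = (oldm.getD (k + 1) []).getD 0 0 := by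
  have h : oldm.length - 1 + 1 = oldm.length := by omega
  simp [bCell, Nat.mod_eq_of_lt hk, h]

lemma bCell_lastrow (oldm : List (List Int)) (t : Nat)
    (hn : 0 < oldm.length) (ht : t + 1 < oldm.length) :
    bCell oldm (oldm.length - 1) t = (oldm.getD 0 []).getD (t + 1) 0 := by
  have h : oldm.length - 1 + 1 = oldm.length := by omega
  simp [bCell, h, Nat.mod_eq_of_lt ht]

lemma bCell_corner (oldm : List (List Int)) (hn : 0 < oldm.length) :
    bCell oldm (oldm.length - 1) (oldm.length - 1) = (oldm.getD 0 []).getD 0 0 := by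
  have h : oldm.length - 1 + 1 = oldm.length := by omega
  simp [bCell, h]

-- A's inner-loop body advances aCell in its t argument
lemma inner_step (oldm : List (List Int)) (k t : Nat)
    (hk : k < oldm.length - 1) (ht : t < oldm.length - 1) :
    PySem.List.pySetD (mOf oldm.length (aCell oldm k t)) (k : Int)
      (PySem.List.pySetD
        (PySem.List.pyGetD (mOf oldm.length (aCell oldm k t)) (k : Int) [])
        (t : Int)
        (PySem.List.pyGetD (PySem.List.pyGetD oldm ((k : Int) + 1) []) ((t : Int) + 1) 0))
      = mOf oldm.length (aCell oldm k (t + 1)) := by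
  rw [row_mOf _ _ _ (by omega),
      show ((k : Int) + 1) = ((k + 1 : Nat) : Int) by push_cast; ring,
      show ((t : Int) + 1) = ((t + 1 : Nat) : Int) by push_cast; ring,
      PySem.List.pyGetD_natCast, PySem.List.pyGetD_natCast,
      rowset_nat, assign_mOf _ _ _ _ _ (by omega) (by omega)]
  apply mOf_congr
  intro i hi j hj
  simp only [updF, aCell]
  by_cases h : i = k ∧ j = t
  · rw [if_pos h, if_pos (by omega), h.1, h.2,
        bCell_interior _ _ _ (by omega) (by omega)]
  · rw [if_neg h]
    congr 1
    simp only [eq_iff_iff]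
    omega

-- the inner loop, run to index t
lemma inner_loop (oldm : List (List Int)) (k t : Nat)
    (hk : k < oldm.length - 1) (ht : t ≤ oldm.length - 1) :
    (List.range t).foldl (fun (m : List (List Int)) (j : Nat) =>
      PySem.List.pySetD m ((k : Nat) : Int)
        (PySem.List.pySetD (PySem.List.pyGetD m ((k : Nat) : Int) [])
          ((j : Nat) : Int)
          (PySem.List.pyGetD (PySem.List.pyGetD oldm (((k : Nat) : Int) + 1) []) ((((j : Nat)) : Int) + 1) 0)))
      (mOf oldm.length (aCell oldm k 0))
      = mOf oldm.length (aCell oldm k t) := by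
  induction t with
  | zero => simp
  | succ t ih =>
      rw [List.range_succ, List.foldl_append, ih (by omega)]
      simp only [List.foldl_cons, List.foldl_nil]
      exact inner_step oldm k t hk (by omega)

-- A's whole outer body advances aCell in its k argument
lemma outer_step (oldm : List (List Int)) (k : Nat) (hk : k < oldm.length - 1) :
    bodyA oldm (mOf oldm.length (aCell oldm k 0)) ((k : Nat) : Int)
      = mOf oldm.length (aCell oldm (k + 1) 0) := by
  have hn : 0 < oldm.length := by omega
  have htN : (((oldm.length : Int) - 1) - 0).toNat = oldm.length - 1 := by omega
  simp only [bodyA]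
  rw [PySem.List.pyRange_one, htN]
  simp only [List.foldl_map, zero_add]
  rw [inner_loop oldm k (oldm.length - 1) hk le_rfl]
  -- m[i][-1] = oldm[i+1][0]
  rw [row_mOf _ _ _ (by omega),
      show ((k : Int) + 1) = ((k + 1 : Nat) : Int) by push_cast; ring,
      PySem.List.pyGetD_natCast, PySem.List.pyGetD_zero,
      rowset_neg_one _ _ _ hn,
      assign_mOf _ _ _ _ _ (by omega) (by omega)]
  -- m[-1][i] = oldm[0][i+1]
  rw [row_mOf_neg_one _ _ hn, rowset_nat,
      PySem.List.pyGetD_zero,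
      assign_mOf_last _ _ _ _ hn (by omega)]
  apply mOf_congr
  intro i hi j hj
  simp only [updF, aCell]
  by_cases h1 : i = oldm.length - 1 ∧ j = k
  · rw [if_pos h1, if_pos (by omega), h1.1, h1.2,
        bCell_lastrow _ _ hn (by omega), PySem.List.pyGetD_natCast]
  · rw [if_neg h1]
    by_cases h2 : i = k ∧ j = oldm.length - 1
    · rw [if_pos h2, if_pos (by omega), h2.1, h2.2,
          bCell_lastcol _ _ (by omega)]
    · rw [if_neg h2]
      congr 1
      simp only [eq_iff_iff]
      omega

-- A's outer loop, run to index k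
lemma outer_loop (oldm : List (List Int)) (k : Nat) (hk : k ≤ oldm.length - 1) :
    (List.range k).foldl (fun (m : List (List Int)) (i : Nat) => bodyA oldm m ((i : Nat) : Int))
      (mOf oldm.length (aCell oldm 0 0))
      = mOf oldm.length (aCell oldm k 0) := by
  induction k with
  | zero => simp
  | succ k ih =>
      rw [List.range_succ, List.foldl_append, ih (by omega)]
      simp only [List.foldl_cons, List.foldl_nil]
      exact outer_step oldm k (by omega)

lemma m0_eq (oldm : List (List Int)) :
    (List.range oldm.length).map (fun _ => (List.range oldm.length).map (fun _ => (0 : Int)))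
      = mOf oldm.length (aCell oldm 0 0) := by
  unfold mOf
  apply List.map_congr_left
  intro i hi
  apply List.map_congr_left
  intro j hj
  simp [aCell]

-- A computes the modular-shift matrix
lemma move_b_eq_mOf (oldm : List (List Int)) (hn : 0 < oldm.length) :
    move_b oldm = mOf oldm.length (bCell oldm) := by
  have htN : (((oldm.length : Int) - 1) - 0).toNat = oldm.length - 1 := by omega
  rw [move_b_unfold, PySem.List.pyRange_one, htN]
  simp only [List.foldl_map, zero_add]
  rw [m0_eq, outer_loop oldm (oldm.length - 1) le_rfl]
  rw [row_mOf_neg_one _ _ hn, rowset_neg_one _ _ _ hn,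
      PySem.List.pyGetD_zero, PySem.List.pyGetD_zero,
      assign_mOf_last _ _ _ _ hn (by omega)]
  apply mOf_congr
  intro i hi j hj
  simp only [updF, aCell]
  by_cases h : i = oldm.length - 1 ∧ j = oldm.length - 1
  · rw [if_pos h, h.1, h.2, bCell_corner _ hn]
  · rw [if_neg h, if_pos (by omega)]

-- one rotation-by-slicing equals the modular rule, for any list long enough
lemma rot_eq {α : Type} (r : List α) (d : α) (n : Nat) (hn : 0 < n) (hr : n ≤ r.length) :
    (r.drop 1).take (n - 1) ++ r.take 1
      = (List.range n).map (fun j => r.getD ((j + 1) % n) d) := by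
  apply List.ext_getElem
  · simp; omega
  · intro j h1 h2
    have hlt : j < n := by simpa using h2
    by_cases hj : j < n - 1
    · rw [List.getElem_append_left (by simp; omega)]
      have hjn : (j + 1) % n = j + 1 := Nat.mod_eq_of_lt (by omega)
      simp only [List.getElem_take, List.getElem_drop, List.getElem_map, List.getElem_range]
      rw [hjn, List.getD_eq_getElem r d (by omega)]
      congr 1
      omega
    · have hj' : j = n - 1 := by omega
      rw [List.getElem_append_right (by simp; omega)]
      have hjn : (j + 1) % n = 0 := by rw [hj']; simp [Nat.sub_add_cancel hn]
      simp only [List.getElem_take, List.getElem_map, List.getElem_range]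
      rw [hjn, List.getD_eq_getElem r d (by omega)]
      congr 1
      simp
      omega

-- B computes the modular-shift matrix
lemma slice_rot (r : List Int) (n : Nat) (hn : 0 < n) (hr : n ≤ r.length) :
    PySem.List.slice r (some 1) (some (n : Int)) ++ PySem.List.slice r none (some 1)
      = (List.range n).map (fun j => r.getD ((j + 1) % n) (0 : Int)) := by
  rw [PySem.List.slice_toNat r (by norm_num) (by positivity),
      PySem.List.slice_to r (by norm_num)]
  have h1 : ((1 : Int)).toNat = 1 := rfl
  have h2 : ((n : Int)).toNat = n := Int.toNat_natCast n
  rw [h1, h2]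
  exact rot_eq r 0 n hn hr

lemma move_b_alt_eq_mOf (oldm : List (List Int)) (h : Pre_move_b oldm) :
    move_b_alt oldm = mOf oldm.length (bCell oldm) := by
  obtain ⟨hn, hrows⟩ := h
  show (PySem.List.slice oldm (some 1) none ++ PySem.List.slice oldm none (some 1)).map _ = _
  rw [PySem.List.slice_from_one, PySem.List.slice_to oldm (by norm_num)]
  have h1 : oldm.tail = oldm.drop 1 := List.drop_one.symm
  have h0 : ((1 : Int)).toNat = 1 := rfl
  rw [h1, h0]
  have hout : oldm.drop 1 ++ oldm.take 1
      = (List.range oldm.length).map (fun i => oldm.getD ((i + 1) % oldm.length) ([] : List Int)) := by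
    have h := rot_eq oldm ([] : List Int) oldm.length hn le_rfl
    rw [List.take_of_length_le (by simp)] at h
    exact h
  rw [hout, List.map_map, mOf]
  apply List.map_congr_left
  intro i hi
  simp only [Function.comp]
  have hmem : oldm.getD ((i + 1) % oldm.length) [] ∈ oldm := by
    rw [List.getD_eq_getElem oldm [] (Nat.mod_lt _ hn)]
    exact List.getElem_mem _
  exact slice_rot _ _ hn (hrows _ hmem)

-- ===== VERDICT (by name: the statement is the Claim_ definition above) =====
theorem move_b_spec : Claim_equal_move_b := by
  intro oldm _ hpre
  unfold Spec_move_b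
  rw [move_b_eq_mOf oldm hpre.1, move_b_alt_eq_mOf oldm hpre]
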